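-- pv_equiv track=rewrite | github.com/ckoons/BubbleSpacetimeTheory | play/toy_292_adaptive_conservation.py | strategy_greedy
-- ===== SOURCE A (Python) =====
-- from collections import defaultdict
--
-- def up(clauses, n, assign):
--     """Unit propagation. Returns (assignment_dict, contradiction_bool)."""
--     a = dict(assign)
--     changed = True
--     while changed:
--         changed = False
--         for cl in clauses:
--             unset = []
--             sat = False
--             for lit in cl:
--                 v = abs(lit)
--                 if v in a:
--                     if (lit > 0) == a[v]:
--                         sat = True
--                         break
--                 else:
--                     unset.append(lit)
--             if sat:
--                 continue
--             if len(unset) == 0: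
--                 return a, True
--             if len(unset) == 1:
--                 lit = unset[0]
--                 v = abs(lit)
--                 if v not in a:
--                     a[v] = (lit > 0)
--                     changed = True
--     return a, False
--
-- def score_most_constrained(clauses, n, current_assign):
--     """Score = number of unsatisfied clause appearances."""
--     scores = defaultdict(int)
--     for cl in clauses:
--         cl_sat = any(abs(l) in current_assign and
--                      (l > 0) == current_assign[abs(l)] for l in cl)
--         if not cl_sat:
--             for l in cl:
--                 v = abs(l)
--                 if v not in current_assign:
--                     scores[v] += 1
--     return scores
--
-- def strategy_greedy(clauses, n, max_steps, rng):
--     """Greedy-adaptive: always pick most-constrained variable."""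
--     assign = {}
--     trajectory = []
--
--     for step in range(max_steps):
--         scores = score_most_constrained(clauses, n, assign)
--         if not scores:
--             break
--         var = max(scores, key=scores.get)
--         # Try both polarities
--         a_t, c_t = up(clauses, n, {**assign, var: True})
--         a_f, c_f = up(clauses, n, {**assign, var: False})
--         if c_t and c_f:
--             break
--         elif c_t:
--             assign = a_f
--         elif c_f:
--             assign = a_t
--         else:
--             assign = a_t if len(a_t) >= len(a_f) else a_f
--         trajectory.append((step, len(assign)))
--
--     return trajectory, assign
-- ===== SOURCE B (Python) =====
-- def strategy_greedy(clauses, n, max_steps, rng):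
--     """Greedy-adaptive via incremental CNF simplification: a residual clause set
--     (satisfied clauses dropped, falsified literals deleted) is carried across
--     steps, so scoring is a plain literal count over the residual and propagation
--     never rescans already-satisfied clauses."""
--
--     def simplify_round(a, cnf):
--         # One pass over the residual: drop satisfied clauses, delete falsified
--         # literals, assign units immediately. Returns (new_cnf, conflict,
--         # assigned_any); mutates a.
--         out = []
--         assigned = False
--         for cl in cnf:
--             if any(a.get(abs(l)) == (l > 0) for l in cl):
--                 continue
--             keep = [l for l in cl if abs(l) not in a]
--             if not keep:
--                 return [], True, assigned
--             if len(keep) == 1: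
--                 a[abs(keep[0])] = keep[0] > 0
--                 assigned = True
--             else:
--                 out.append(keep)
--         return out, False, assigned
--
--     def propagate(cnf, a):
--         while True:
--             cnf, conflict, assigned = simplify_round(a, cnf)
--             if conflict or not assigned:
--                 return cnf, a, conflict
--
--     assign = {}
--     cnf = list(clauses)
--     trajectory = []
--     for step in range(max_steps):
--         counts = {}
--         for cl in cnf:
--             for l in cl:
--                 counts[abs(l)] = counts.get(abs(l), 0) + 1
--         if not counts:
--             break
--         var = max(counts, key=counts.get)
--         cnf_t, a_t, c_t = propagate(cnf, {**assign, var: True})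
--         cnf_f, a_f, c_f = propagate(cnf, {**assign, var: False})
--         if c_t and c_f:
--             break
--         elif c_t:
--             cnf, assign = cnf_f, a_f
--         elif c_f:
--             cnf, assign = cnf_t, a_t
--         else:
--             cnf, assign = (cnf_t, a_t) if len(a_t) >= len(a_f) else (cnf_f, a_f)
--         trajectory.append((step, len(assign)))
--     return trajectory, assign
-- ===== Notes on version B (the rewrite author's own statement) =====
-- stated objective: faster
-- what changed: B maintains an incrementally simplified residual clause set across steps (satisfied clauses dropped permanently, falsified literals deleted) in place of A's repeated rescans of the original clauses: scoring becomes a plain literal count over the residual with no satisfaction/assignment tests, and unit propagation is a simplify-round loop over the shrinking residual instead of A's pass loop over the full clause list.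
import Mathlib
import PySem

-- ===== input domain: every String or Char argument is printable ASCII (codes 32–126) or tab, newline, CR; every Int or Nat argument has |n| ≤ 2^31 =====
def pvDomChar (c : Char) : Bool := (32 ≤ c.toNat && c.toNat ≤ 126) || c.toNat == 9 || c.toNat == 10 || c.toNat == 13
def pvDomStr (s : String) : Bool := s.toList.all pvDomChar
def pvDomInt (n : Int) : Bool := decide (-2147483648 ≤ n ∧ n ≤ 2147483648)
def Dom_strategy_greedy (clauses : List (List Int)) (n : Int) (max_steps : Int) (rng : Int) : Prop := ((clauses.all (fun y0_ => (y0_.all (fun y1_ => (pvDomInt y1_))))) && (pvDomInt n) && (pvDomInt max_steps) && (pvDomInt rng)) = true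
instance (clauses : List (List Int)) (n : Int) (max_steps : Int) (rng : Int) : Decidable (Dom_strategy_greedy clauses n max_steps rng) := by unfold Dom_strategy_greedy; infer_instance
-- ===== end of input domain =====

-- B replaces A's repeated full rescans (a fresh scoring pass over all clauses plus
-- unit-propagation passes over the original clause list) by an incrementally simplified
-- residual clause set carried across steps; objective: faster (measured constant-factor), same results.

-- ===== PORT A =====

-- inner literal scan of `up` (accumulates `unset`, early break on satisfied literal)
def upScanA (a : PySem.Dict Int Bool) (unset : List Int) : List Int → List Int × Bool
  | [] => (unset, false)
  | lit :: rest =>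
    if a.contains |lit| then
      if (decide (0 < lit)) == a.getD |lit| false then (unset, true)
      else upScanA a unset rest
    else upScanA a (unset ++ [lit]) rest

-- one `for cl in clauses` pass of `up`; result (a, contradiction, changed)
def upPassA (a : PySem.Dict Int Bool) (changed : Bool) : List (List Int) → PySem.Dict Int Bool × Bool × Bool
  | [] => (a, false, changed)
  | cl :: rest =>
    if (upScanA a [] cl).2 then upPassA a changed rest
    else
      match (upScanA a [] cl).1 with
      | [] => (a, true, changed)
      | [lit] =>
        if a.contains |lit| then upPassA a changed rest
        else upPassA (a.insert |lit| (decide (0 < lit))) true rest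
      | _ => upPassA a changed rest

-- the `while changed` loop of `up`; fuel only guards termination (one pass per unit of fuel)
def upLoopA (clauses : List (List Int)) : Nat → PySem.Dict Int Bool → PySem.Dict Int Bool × Bool
  | 0, a => (a, false)
  | fuel+1, a =>
    match upPassA a false clauses with
    | (a', true, _) => (a', true)
    | (a', false, ch) => if ch then upLoopA clauses fuel a' else (a', false)

def upA (clauses : List (List Int)) (a : PySem.Dict Int Bool) : PySem.Dict Int Bool × Bool :=
  upLoopA clauses ((clauses.map List.length).sum + 1) a

-- `cl_sat` of score_most_constrained
def clSatA (a : PySem.Dict Int Bool) (cl : List Int) : Bool :=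
  cl.any (fun l => a.contains |l| && ((decide (0 < l)) == a.getD |l| false))

def scoresA (clauses : List (List Int)) (a : PySem.Dict Int Bool) : PySem.Dict Int Int :=
  clauses.foldl (fun sc cl =>
    if clSatA a cl then sc
    else cl.foldl (fun sc l => if a.contains |l| then sc else sc.modify |l| 0 (· + 1)) sc)
    PySem.Dict.empty

-- the `for step in range(max_steps)` loop (fuel = remaining iterations, step = index);
-- `if not scores / max(scores, key=scores.get)` is the single match on max?
def mainA (clauses : List (List Int)) : Nat → Int → PySem.Dict Int Bool → List (Int × Int) → List (Int × Int) × PySem.Dict Int Bool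
  | 0, _, assign, traj => (traj, assign)
  | fuel+1, step, assign, traj =>
    let sc := scoresA clauses assign
    match PySem.List.max? sc.keys (fun k => sc.getD k 0) with
    | none => (traj, assign)
    | some var =>
      let t := upA clauses (assign.insert var true)
      let f := upA clauses (assign.insert var false)
      if t.2 && f.2 then (traj, assign)
      else
        let assign' := if t.2 then f.1 else if f.2 then t.1
          else if f.1.size ≤ t.1.size then t.1 else f.1
        mainA clauses fuel (step+1) assign' (traj ++ [(step, (assign'.size : Int))])

def strategy_greedy (clauses : List (List Int)) (n : Int) (max_steps : Int) (rng : Int) : (List (Int × Int)) × (List (Int × Bool)) :=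
  let r := mainA clauses max_steps.toNat 0 PySem.Dict.empty []
  (r.1, r.2.items)

-- ===== PORT B =====

-- `any(a.get(abs(l)) == (l > 0) for l in cl)`
def satB (a : PySem.Dict Int Bool) (cl : List Int) : Bool :=
  cl.any (fun l => a.get? |l| == some (decide (0 < l)))

-- `[l for l in cl if abs(l) not in a]`
def resL (a : PySem.Dict Int Bool) (cl : List Int) : List Int :=
  cl.filter (fun l => !(a.contains |l|))

-- `simplify_round`: one pass over the residual clause set; `out` is the accumulator;
-- result (new_cnf, a, conflict, assigned_any)
def roundB (a : PySem.Dict Int Bool) (asg : Bool) (out : List (List Int)) : List (List Int) → List (List Int) × PySem.Dict Int Bool × Bool × Bool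
  | [] => (out, a, false, asg)
  | cl :: rest =>
    if satB a cl then roundB a asg out rest
    else
      match resL a cl with
      | [] => ([], a, true, asg)
      | [l] => roundB (a.insert |l| (decide (0 < l))) true out rest
      | keep => roundB a asg (out ++ [keep]) rest

-- `propagate`: rounds until conflict or no assignment; fuel only guards termination
def propB : Nat → PySem.Dict Int Bool → List (List Int) → List (List Int) × PySem.Dict Int Bool × Bool
  | 0, a, cnf => (cnf, a, false)
  | fuel+1, a, cnf =>
    match roundB a false [] cnf with
    | (out, a', cf, asg) => if cf || !asg then (out, a', cf) else propB fuel a' out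

-- the `counts` nested loop over the residual clause set
def countsB (cnf : List (List Int)) : PySem.Dict Int Int :=
  cnf.foldl (fun d cl => cl.foldl (fun d l => d.insert |l| (d.getD |l| 0 + 1)) d) PySem.Dict.empty

-- the `for step in range(max_steps)` loop of B, carrying the residual cnf
def mainB : Nat → Int → PySem.Dict Int Bool → List (List Int) → List (Int × Int) → List (Int × Int) × PySem.Dict Int Bool
  | 0, _, assign, _, traj => (traj, assign)
  | fuel+1, step, assign, cnf, traj =>
    let counts := countsB cnf
    match PySem.List.max? counts.keys (fun k => counts.getD k 0) with
    | none => (traj, assign)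
    | some var =>
      let t := propB ((cnf.map List.length).sum + 1) (assign.insert var true) cnf
      let f := propB ((cnf.map List.length).sum + 1) (assign.insert var false) cnf
      if t.2.2 && f.2.2 then (traj, assign)
      else
        let p := if t.2.2 then (f.1, f.2.1) else if f.2.2 then (t.1, t.2.1)
          else if f.2.1.size ≤ t.2.1.size then (t.1, t.2.1) else (f.1, f.2.1)
        mainB fuel (step+1) p.2 p.1 (traj ++ [(step, (p.2.size : Int))])

def strategy_greedy_alt (clauses : List (List Int)) (n : Int) (max_steps : Int) (rng : Int) : (List (Int × Int)) × (List (Int × Bool)) :=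
  let r := mainB max_steps.toNat 0 PySem.Dict.empty clauses []
  (r.1, r.2.items)

-- ===== PRECONDITION & SPEC =====
def Spec_strategy_greedy (clauses : List (List Int)) (n : Int) (max_steps : Int) (rng : Int) (out : (List (Int × Int)) × (List (Int × Bool))) : Prop := out = strategy_greedy_alt clauses n max_steps rng
instance (clauses : List (List Int)) (n : Int) (max_steps : Int) (rng : Int) (out : (List (Int × Int)) × (List (Int × Bool))) : Decidable (Spec_strategy_greedy clauses n max_steps rng out) := by unfold Spec_strategy_greedy; infer_instance

-- ===== CLAIM (what is proved, stated in full; the proofs are below) =====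
def Claim_equal_strategy_greedy : Prop := ∀ (clauses : List (List Int)) (n : Int) (max_steps : Int) (rng : Int), Dom_strategy_greedy clauses n max_steps rng → Spec_strategy_greedy clauses n max_steps rng (strategy_greedy clauses n max_steps rng)

-- ===== LEMMAS AND PROOFS =====

-- `a` extends to `a'` (assignments only grow, values never change)
def ExtD (a a' : PySem.Dict Int Bool) : Prop := ∀ k v, a.get? k = some v → a'.get? k = some v

-- the residual clause set of `clauses` under `a`
def resCnf (a : PySem.Dict Int Bool) (clauses : List (List Int)) : List (List Int) :=
  (clauses.filter (fun cl => !(satB a cl))).map (resL a)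

theorem satB_cons (a : PySem.Dict Int Bool) (l : Int) (rest : List Int) :
    satB a (l :: rest) = ((a.get? |l| == some (decide (0 < l))) || satB a rest) := by
  simp [satB]

theorem resL_cons_mem (a : PySem.Dict Int Bool) (l : Int) (rest : List Int)
    (h : a.contains |l| = true) : resL a (l :: rest) = resL a rest := by
  simp [resL, h]

theorem resL_cons_not_mem (a : PySem.Dict Int Bool) (l : Int) (rest : List Int)
    (h : a.contains |l| = false) : resL a (l :: rest) = l :: resL a rest := by
  simp [resL, h]

-- invariant relating A's full clause list to B's residual cnf at dict `a`:
-- dropped clauses are satisfied, kept clauses are residuals taken at some earlier dict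
inductive RRel : PySem.Dict Int Bool → List (List Int) → List (List Int) → Prop
  | nil (a) : RRel a [] []
  | drop (a cl cls cnf) : satB a cl = true → RRel a cls cnf → RRel a (cl :: cls) cnf
  | keep (a a0 cl cls cnf) : ExtD a0 a → satB a0 cl = false → RRel a cls cnf →
      RRel a (cl :: cls) (resL a0 cl :: cnf)

theorem extD_refl (a : PySem.Dict Int Bool) : ExtD a a := fun _ _ h => h

theorem extD_trans {a b c : PySem.Dict Int Bool} (h1 : ExtD a b) (h2 : ExtD b c) : ExtD a c :=
  fun k v h => h2 k v (h1 k v h)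

theorem contains_mono {a a' : PySem.Dict Int Bool} (h : ExtD a a') {k : Int}
    (hc : a.contains k = true) : a'.contains k = true := by
  rw [PySem.Dict.contains_eq_isSome_get?] at hc ⊢
  cases hv : a.get? k with
  | none => rw [hv] at hc; simp at hc
  | some v => rw [h k v hv]; rfl

theorem not_contains_mono {a a' : PySem.Dict Int Bool} (h : ExtD a a') {k : Int}
    (hc : a'.contains k = false) : a.contains k = false := by
  by_cases hx : a.contains k = true
  · rw [contains_mono h hx] at hc; exact absurd hc (by simp)
  · simpa using hx

theorem satB_mono {a a' : PySem.Dict Int Bool} (h : ExtD a a') {cl : List Int}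
    (hs : satB a cl = true) : satB a' cl = true := by
  unfold satB at hs ⊢
  rw [List.any_eq_true] at hs ⊢
  obtain ⟨l, hl, hp⟩ := hs
  refine ⟨l, hl, ?_⟩
  cases hv : a.get? |l| with
  | none => rw [hv] at hp; simp at hp
  | some v => rw [hv] at hp; rw [h _ v hv]; exact hp

theorem extD_insert (a : PySem.Dict Int Bool) {k : Int} (v : Bool)
    (hk : a.contains k = false) : ExtD a (a.insert k v) := by
  intro k' v' h
  rcases eq_or_ne k' k with rfl | hne
  · rw [PySem.Dict.contains_eq_isSome_get?, h] at hk; simp at hk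
  · rw [PySem.Dict.get?_insert_of_ne a v hne]; exact h

theorem rrel_mono {a a' : PySem.Dict Int Bool} (h : ExtD a a') :
    ∀ {cls cnf}, RRel a cls cnf → RRel a' cls cnf := by
  intro cls cnf hr
  induction hr with
  | nil => exact RRel.nil a'
  | drop cl cls cnf hs _ ih => exact RRel.drop a' cl cls cnf (satB_mono h hs) ih
  | keep a0 cl cls cnf he hs _ ih => exact RRel.keep a' a0 cl cls cnf (extD_trans he h) hs ih

-- evaluating a residual clause at an extension gives the same sat status
theorem satB_resL {a0 a : PySem.Dict Int Bool} (he : ExtD a0 a) {cl : List Int}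
    (hs : satB a0 cl = false) : satB a (resL a0 cl) = satB a cl := by
  induction cl with
  | nil => rfl
  | cons l rest ih =>
    rw [satB_cons] at hs
    simp only [Bool.or_eq_false_iff] at hs
    obtain ⟨h1, h2⟩ := hs
    by_cases hc : a0.contains |l| = true
    · rw [PySem.Dict.contains_eq_isSome_get?] at hc
      cases hv : a0.get? |l| with
      | none => rw [hv] at hc; simp at hc
      | some v =>
        have hvne : (some v == some (decide (0 < l))) = false := by rw [hv] at h1; exact h1
        have hcc : a0.contains |l| = true := by
          rw [PySem.Dict.contains_eq_isSome_get?, hv]; rfl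
        rw [resL_cons_mem a0 l rest hcc, ih h2, satB_cons, he _ v hv, hvne]
        simp
    · have hcc : a0.contains |l| = false := by simpa using hc
      rw [resL_cons_not_mem a0 l rest hcc, satB_cons, satB_cons, ih h2]

-- re-filtering a residual clause at an extension gives the full residual
theorem resL_resL {a0 a : PySem.Dict Int Bool} (he : ExtD a0 a) (cl : List Int) :
    resL a (resL a0 cl) = resL a cl := by
  unfold resL
  rw [List.filter_filter]
  apply List.filter_congr
  intro l _
  by_cases hc : a.contains |l| = true
  · simp [hc]
  · have hc' : a.contains |l| = false := by simpa using hc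
    rw [not_contains_mono he hc']
    simp [hc']

-- A's literal test (contains && getD) and B's (get? == some) agree
theorem pred_eq (a : PySem.Dict Int Bool) (l : Int) :
    (a.contains |l| && ((decide (0 < l)) == a.getD |l| false)) = (a.get? |l| == some (decide (0 < l))) := by
  rw [PySem.Dict.contains_eq_isSome_get?, PySem.Dict.getD_eq_get?_getD]
  cases h : a.get? |l| with
  | none => simp
  | some b => cases b <;> cases h2 : decide (0 < l) <;> simp

theorem clSatA_eq_satB (a : PySem.Dict Int Bool) (cl : List Int) :
    clSatA a cl = satB a cl := by
  unfold clSatA satB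
  exact PySem.List.any_congr_mem (fun l _ => pred_eq a l)

-- A's scan flag is the satB test
theorem upScanA_snd (a : PySem.Dict Int Bool) (cl : List Int) :
    ∀ u, (upScanA a u cl).2 = satB a cl := by
  induction cl with
  | nil => intro u; simp [upScanA, satB]
  | cons lit rest ih =>
    intro u
    rw [satB_cons]
    by_cases hc : a.contains |lit|
    · by_cases he : (decide (0 < lit)) == a.getD |lit| false
      · have h : (a.get? |lit| == some (decide (0 < lit))) = true := by
          rw [← pred_eq]; simp [hc, he]
        simp [upScanA, hc, he, h]
      · have h : (a.get? |lit| == some (decide (0 < lit))) = false := by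
          rw [← pred_eq]; simp [he]
        simp only [upScanA, hc, if_true, he, Bool.false_eq_true, if_false, h, Bool.false_or]
        exact ih u
    · have h : (a.get? |lit| == some (decide (0 < lit))) = false := by
        rw [← pred_eq]; simp [hc]
      simp only [upScanA, hc, Bool.false_eq_true, if_false, h, Bool.false_or]
      exact ih (u ++ [lit])

-- when no literal satisfies, A's `unset` is the residual
theorem upScanA_fst (a : PySem.Dict Int Bool) (cl : List Int)
    (h : satB a cl = false) :
    ∀ u, (upScanA a u cl).1 = u ++ resL a cl := by
  induction cl with
  | nil => intro u; simp [upScanA, resL]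
  | cons lit rest ih =>
    rw [satB_cons] at h
    simp only [Bool.or_eq_false_iff] at h
    obtain ⟨h1, h2⟩ := h
    intro u
    by_cases hc : a.contains |lit|
    · have he : ((decide (0 < lit)) == a.getD |lit| false) = false := by
        have := pred_eq a lit
        rw [h1] at this
        simpa [hc] using this
      rw [resL_cons_mem a lit rest hc]
      simp only [upScanA, hc, if_true, he, Bool.false_eq_true, if_false]
      exact ih h2 u
    · have hc' : a.contains |lit| = false := by simpa using hc
      rw [resL_cons_not_mem a lit rest hc']
      simp only [upScanA, hc', Bool.false_eq_true, if_false]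
      rw [ih h2 (u ++ [lit])]
      simp

-- A's pass never forgets assignments, and only adds fresh ones
theorem upPassA_ext (cls : List (List Int)) :
    ∀ a ch, ExtD a (upPassA a ch cls).1 := by
  induction cls with
  | nil => intro a ch; exact extD_refl a
  | cons cl rest ih =>
    intro a ch
    by_cases hs : (upScanA a [] cl).2
    · simpa [upPassA, hs] using ih a ch
    · simp only [upPassA, hs, if_false, Bool.false_eq_true]
      cases hu : (upScanA a [] cl).1 with
      | nil => exact extD_refl a
      | cons lit tail =>
        cases tail with
        | nil =>
          by_cases hc : a.contains |lit|
          · simpa [hc] using ih a ch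
          · have hc' : a.contains |lit| = false := by simpa using hc
            simp only [hc', Bool.false_eq_true, if_false]
            exact extD_trans (extD_insert a _ hc') (ih _ true)
        | cons y ys => simpa using ih a ch

-- the changed flag is monotone in its input
theorem upPassA_flag (cls : List (List Int)) :
    ∀ a, (upPassA a true cls).2.2 = true := by
  induction cls with
  | nil => intro a; rfl
  | cons cl rest ih =>
    intro a
    by_cases hs : (upScanA a [] cl).2
    · simp [upPassA, hs, ih]
    · simp only [upPassA, hs, if_false, Bool.false_eq_true]
      cases hu : (upScanA a [] cl).1 with
      | nil => rfl
      | cons lit tail =>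
        cases tail with
        | nil => by_cases hc : a.contains |lit| <;> simp [hc, ih]
        | cons y ys => simp [ih]

-- B's round: the accumulator only prefixes the output
theorem roundB_out (cnf : List (List Int)) :
    ∀ a asg out, roundB a asg out cnf =
      (if (roundB a asg [] cnf).2.2.1 then [] else out ++ (roundB a asg [] cnf).1,
       (roundB a asg [] cnf).2) := by
  induction cnf with
  | nil => intro a asg out; simp [roundB]
  | cons cl rest ih =>
    intro a asg out
    by_cases hs : satB a cl
    · simp only [roundB, hs, if_true]
      rw [ih a asg out]
    · cases hf : resL a cl with
      | nil => simp [roundB, hs, hf]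
      | cons l tail =>
        cases tail with
        | nil =>
          simp only [roundB, hs, Bool.false_eq_true, if_false, hf]
          rw [ih _ true out]
        | cons y ys =>
          simp only [roundB, hs, Bool.false_eq_true, if_false, hf]
          rw [ih a asg (out ++ [l :: y :: ys]), ih a asg ([] ++ [l :: y :: ys])]
          by_cases hcf : (roundB a asg [] rest).2.2.1 <;> simp [hcf]

-- literals of B's round output come from its input
theorem roundB_vars (cnf : List (List Int)) :
    ∀ a asg out, (∀ cl' ∈ (roundB a asg out cnf).1, ∀ l ∈ cl',
      cl' ∈ out ∨ ∃ cl ∈ cnf, l ∈ cl) := by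
  induction cnf with
  | nil => intro a asg out cl' h l hl; simp only [roundB] at h; exact Or.inl h
  | cons cl rest ih =>
    intro a asg out cl' h l hl
    by_cases hs : satB a cl
    · simp only [roundB, hs, if_true] at h
      rcases ih a asg out cl' h l hl with h' | ⟨c, hc, hlc⟩
      · exact Or.inl h'
      · exact Or.inr ⟨c, List.mem_cons_of_mem _ hc, hlc⟩
    · cases hf : resL a cl with
      | nil => simp [roundB, hs, hf] at h
      | cons l0 tail =>
        cases tail with
        | nil =>
          simp only [roundB, hs, Bool.false_eq_true, if_false, hf] at h
          rcases ih _ true out cl' h l hl with h' | ⟨c, hc, hlc⟩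
          · exact Or.inl h'
          · exact Or.inr ⟨c, List.mem_cons_of_mem _ hc, hlc⟩
        | cons y ys =>
          simp only [roundB, hs, Bool.false_eq_true, if_false, hf] at h
          rcases ih a asg (out ++ [l0 :: y :: ys]) cl' h l hl with h' | ⟨c, hc, hlc⟩
          · rcases List.mem_append.mp h' with h'' | h''
            · exact Or.inl h''
            · have hcl : cl' = l0 :: y :: ys := by simpa using h''
              subst hcl
              have hres : l ∈ resL a cl := hf ▸ hl
              exact Or.inr ⟨cl, List.mem_cons_self, List.mem_of_mem_filter hres⟩
          · exact Or.inr ⟨c, List.mem_cons_of_mem _ hc, hlc⟩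

theorem resCnf_cons_sat (a : PySem.Dict Int Bool) (cl : List Int) (cls : List (List Int))
    (h : satB a cl = true) : resCnf a (cl :: cls) = resCnf a cls := by
  simp [resCnf, h]

theorem resCnf_cons_unsat (a : PySem.Dict Int Bool) (cl : List Int) (cls : List (List Int))
    (h : satB a cl = false) : resCnf a (cl :: cls) = resL a cl :: resCnf a cls := by
  simp [resCnf, h]

theorem satB_of_lit {a : PySem.Dict Int Bool} {l : Int} {cl : List Int}
    (h : a.get? |l| = some (decide (0 < l))) (hl : l ∈ cl) : satB a cl = true := by
  unfold satB
  rw [List.any_eq_true]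
  exact ⟨l, hl, by rw [h]; simp⟩

-- the bisimulation of one pass/round (called with matching flags)
theorem round_bisim (cls : List (List Int)) :
    ∀ cnf a ch, RRel a cls cnf →
      (roundB a ch [] cnf).2 = upPassA a ch cls ∧
      ((upPassA a ch cls).2.1 = false → RRel (upPassA a ch cls).1 cls (roundB a ch [] cnf).1) ∧
      ((upPassA a ch cls).2.1 = false → (upPassA a ch cls).2.2 = false →
        (upPassA a ch cls).1 = a ∧ (roundB a ch [] cnf).1 = resCnf a cls) := by
  induction cls with
  | nil =>
    intro cnf a ch hr
    cases hr
    exact ⟨rfl, fun _ => RRel.nil a, fun _ _ => ⟨rfl, rfl⟩⟩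
  | cons cl rest ih =>
    intro cnf a ch hr
    have hscan : (upScanA a [] cl).2 = satB a cl := upScanA_snd a cl []
    cases hr with
    | drop =>
      rename_i hsat hrest
      have hA : upPassA a ch (cl :: rest) = upPassA a ch rest := by
        simp only [upPassA, hscan, hsat, if_true]
      obtain ⟨i1, i2, i3⟩ := ih cnf a ch hrest
      rw [hA]
      refine ⟨i1, fun hcf => ?_, fun hcf hch => ?_⟩
      · exact RRel.drop _ cl rest _ (satB_mono (upPassA_ext rest a ch) hsat) (i2 hcf)
      · obtain ⟨ha, ho⟩ := i3 hcf hch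
        exact ⟨ha, by rw [ho, resCnf_cons_sat a cl rest hsat]⟩
    | keep =>
      rename_i a0 cnf' he hs0 hrest
      have hsB : satB a (resL a0 cl) = satB a cl := satB_resL he hs0
      by_cases hsat : satB a cl = true
      · have hA : upPassA a ch (cl :: rest) = upPassA a ch rest := by
          simp only [upPassA, hscan, hsat, if_true]
        have hB : roundB a ch [] (resL a0 cl :: cnf') = roundB a ch [] cnf' := by
          simp only [roundB, hsB, hsat, if_true]
        obtain ⟨i1, i2, i3⟩ := ih cnf' a ch hrest
        rw [hA, hB]
        refine ⟨i1, fun hcf => ?_, fun hcf hch => ?_⟩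
        · exact RRel.drop _ cl rest _ (satB_mono (upPassA_ext rest a ch) hsat) (i2 hcf)
        · obtain ⟨ha, ho⟩ := i3 hcf hch
          exact ⟨ha, by rw [ho, resCnf_cons_sat a cl rest hsat]⟩
      · have hsat' : satB a cl = false := by simpa using hsat
        have hunset : (upScanA a [] cl).1 = resL a cl := by
          simpa using upScanA_fst a cl hsat' []
        have hresres : resL a (resL a0 cl) = resL a cl := resL_resL he cl
        cases hres : resL a cl with
        | nil =>
          have hA : upPassA a ch (cl :: rest) = (a, true, ch) := by
            simp only [upPassA, hscan, hsat', Bool.false_eq_true, if_false, hunset, hres]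
          have hB : roundB a ch [] (resL a0 cl :: cnf') = ([], a, true, ch) := by
            simp only [roundB, hsB, hsat', Bool.false_eq_true, if_false, hresres, hres]
          rw [hA, hB]
          exact ⟨rfl, fun hcf => by simp at hcf, fun hcf _ => by simp at hcf⟩
        | cons l tail =>
          have hlcl : l ∈ cl := List.mem_of_mem_filter (hres ▸ List.mem_cons_self)
          have hlfree : a.contains |l| = false := by
            have := List.of_mem_filter (hres ▸ (List.mem_cons_self : l ∈ l :: tail))
            simpa using this
          cases tail with
          | nil =>
            have hA : upPassA a ch (cl :: rest) =
                upPassA (a.insert |l| (decide (0 < l))) true rest := by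
              simp only [upPassA, hscan, hsat', Bool.false_eq_true, if_false, hunset, hres,
                hlfree]
            have hB : roundB a ch [] (resL a0 cl :: cnf') =
                roundB (a.insert |l| (decide (0 < l))) true [] cnf' := by
              simp only [roundB, hsB, hsat', Bool.false_eq_true, if_false, hresres, hres]
            have hext : ExtD a (a.insert |l| (decide (0 < l))) := extD_insert a _ hlfree
            obtain ⟨i1, i2, i3⟩ := ih cnf' (a.insert |l| (decide (0 < l))) true
              (rrel_mono hext hrest)
            rw [hA, hB]
            refine ⟨i1, fun hcf => ?_, fun _ hch => ?_⟩
            · have hsatA : satB (upPassA (a.insert |l| (decide (0 < l))) true rest).1 cl = true := by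
                refine satB_of_lit ?_ hlcl
                exact upPassA_ext rest _ true _ _ (PySem.Dict.get?_insert_self a _ _)
              exact RRel.drop _ cl rest _ hsatA (i2 hcf)
            · rw [upPassA_flag rest _] at hch
              exact absurd hch (by simp)
          | cons y ys =>
            have hA : upPassA a ch (cl :: rest) = upPassA a ch rest := by
              simp only [upPassA, hscan, hsat', Bool.false_eq_true, if_false, hunset, hres]
            have hB : roundB a ch [] (resL a0 cl :: cnf') =
                roundB a ch [l :: y :: ys] cnf' := by
              simp only [roundB, hsB, hsat', Bool.false_eq_true, if_false, hresres, hres,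
                List.nil_append]
            obtain ⟨i1, i2, i3⟩ := ih cnf' a ch hrest
            rw [hA, hB, roundB_out cnf' a ch [l :: y :: ys]]
            refine ⟨i1, fun hcf => ?_, fun hcf hch => ?_⟩
            · have hcfB : (roundB a ch [] cnf').2.2.1 = false := by rw [i1]; exact hcf
              simp only [hcfB, Bool.false_eq_true, if_false, List.cons_append, List.nil_append]
              exact hres ▸ RRel.keep _ a cl rest _ (upPassA_ext rest a ch) hsat' (i2 hcf)
            · have hcfB : (roundB a ch [] cnf').2.2.1 = false := by rw [i1]; exact hcf
              obtain ⟨ha, ho⟩ := i3 hcf hch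
              refine ⟨ha, ?_⟩
              simp only [hcfB, Bool.false_eq_true, if_false, List.cons_append, List.nil_append]
              rw [ho, resCnf_cons_unsat a cl rest hsat', hres]

-- B's round never forgets assignments
theorem roundB_ext (cnf : List (List Int)) :
    ∀ a asg out, ExtD a (roundB a asg out cnf).2.1 := by
  induction cnf with
  | nil => intro a asg out; exact extD_refl a
  | cons cl rest ih =>
    intro a asg out
    by_cases hs : satB a cl
    · simpa [roundB, hs] using ih a asg out
    · cases hf : resL a cl with
      | nil => simpa [roundB, hs, hf] using extD_refl a
      | cons l tail =>
        cases tail with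
        | nil =>
          simp only [roundB, hs, Bool.false_eq_true, if_false, hf]
          have hlfree : a.contains |l| = false := by
            have := List.of_mem_filter (hf ▸ (List.mem_cons_self : l ∈ [l]))
            simpa using this
          exact extD_trans (extD_insert a _ hlfree) (ih _ true out)
        | cons y ys =>
          simp only [roundB, hs, Bool.false_eq_true, if_false, hf]
          exact ih a asg (out ++ [l :: y :: ys])

-- an assigning round assigns some fresh variable of its input cnf
theorem roundB_fresh (cnf : List (List Int)) :
    ∀ a asg out, (roundB a asg out cnf).2.2.2 = true → asg = true ∨
      ∃ v, v ∈ cnf.flatten.map (fun l => |l|) ∧ a.contains v = false ∧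
        (roundB a asg out cnf).2.1.contains v = true := by
  induction cnf with
  | nil => intro a asg out h; simp only [roundB] at h ⊢; exact Or.inl h
  | cons cl rest ih =>
    intro a asg out h
    by_cases hs : satB a cl
    · simp only [roundB, hs, if_true] at h ⊢
      rcases ih a asg out h with h' | ⟨v, hv, h1, h2⟩
      · exact Or.inl h'
      · exact Or.inr ⟨v, by simp only [List.flatten_cons, List.map_append, List.mem_append]; exact Or.inr hv, h1, h2⟩
    · cases hf : resL a cl with
      | nil => exact Or.inl (by simpa [roundB, hs, hf] using h)
      | cons l tail =>
        cases tail with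
        | nil =>
          simp only [roundB, hs, Bool.false_eq_true, if_false, hf] at h ⊢
          have hlcl : l ∈ cl := List.mem_of_mem_filter (hf ▸ List.mem_cons_self)
          have hlfree : a.contains |l| = false := by
            have := List.of_mem_filter (hf ▸ (List.mem_cons_self : l ∈ [l]))
            simpa using this
          refine Or.inr ⟨|l|, ?_, hlfree, ?_⟩
          · simp only [List.flatten_cons, List.map_append, List.mem_append]
            exact Or.inl (List.mem_map_of_mem hlcl)
          · have : (a.insert |l| (decide (0 < l))).contains |l| = true :=
              PySem.Dict.contains_insert_self a _ _
            have hext := roundB_ext rest (a.insert |l| (decide (0 < l))) true out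
            rw [PySem.Dict.contains_eq_isSome_get?] at this ⊢
            cases hv : (a.insert |l| (decide (0 < l))).get? |l| with
            | none => rw [hv] at this; simp at this
            | some b => rw [hext _ b hv]; rfl
        | cons y ys =>
          simp only [roundB, hs, Bool.false_eq_true, if_false, hf] at h ⊢
          rcases ih a asg (out ++ [l :: y :: ys]) h with h' | ⟨v, hv, h1, h2⟩
          · exact Or.inl h'
          · exact Or.inr ⟨v, by simp only [List.flatten_cons, List.map_append, List.mem_append]; exact Or.inr hv, h1, h2⟩

-- the fuel measure: distinct unassigned variables occurring in the cnf
def mFin (cnf : List (List Int)) (a : PySem.Dict Int Bool) : Nat :=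
  ((cnf.flatten.map (fun l => |l|)).toFinset.filter (fun v => a.contains v = false)).card

theorem mFin_le_sum (cnf : List (List Int)) (a : PySem.Dict Int Bool) :
    mFin cnf a ≤ (cnf.map List.length).sum := by
  unfold mFin
  calc _ ≤ (cnf.flatten.map (fun l => |l|)).toFinset.card := Finset.card_filter_le _ _
    _ ≤ (cnf.flatten.map (fun l => |l|)).length := List.toFinset_card_le _
    _ = cnf.flatten.length := by rw [List.length_map]
    _ = (cnf.map List.length).sum := List.length_flatten

theorem mFin_mono_cnf {cnf cnf' : List (List Int)} (a : PySem.Dict Int Bool)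
    (h : ∀ l, (∃ cl' ∈ cnf', l ∈ cl') → ∃ cl ∈ cnf, l ∈ cl) :
    mFin cnf' a ≤ mFin cnf a := by
  unfold mFin
  apply Finset.card_le_card
  apply Finset.monotone_filter_left
  intro v hv
  rw [List.mem_toFinset, List.mem_map] at hv ⊢
  obtain ⟨l, hl, rfl⟩ := hv
  rw [List.mem_flatten] at hl
  obtain ⟨cl, hcl, hlc⟩ := h l hl
  exact ⟨l, List.mem_flatten.mpr ⟨cl, hcl, hlc⟩, rfl⟩

theorem mFin_strict {cnf : List (List Int)} {a a' : PySem.Dict Int Bool}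
    (he : ExtD a a') {v : Int} (hv : v ∈ cnf.flatten.map (fun l => |l|))
    (h1 : a.contains v = false) (h2 : a'.contains v = true) :
    mFin cnf a' < mFin cnf a := by
  unfold mFin
  apply Finset.card_lt_card
  constructor
  · intro x hx
    rw [Finset.mem_filter] at hx ⊢
    exact ⟨hx.1, not_contains_mono he hx.2⟩
  · intro hsub
    have hvmem : v ∈ (cnf.flatten.map (fun l => |l|)).toFinset.filter
        (fun v => a.contains v = false) := by
      rw [Finset.mem_filter, List.mem_toFinset]
      exact ⟨hv, h1⟩
    have := hsub hvmem
    rw [Finset.mem_filter] at this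
    rw [this.2] at h2
    exact absurd h2 (by simp)

-- the propagation loops agree and B returns the exact residual
theorem prop_bisim (cls : List (List Int)) :
    ∀ (fB : Nat) (fA : Nat) a cnf, RRel a cls cnf →
      mFin cnf a < fA → mFin cnf a < fB →
      (propB fB a cnf).2.1 = (upLoopA cls fA a).1 ∧
      (propB fB a cnf).2.2 = (upLoopA cls fA a).2 ∧
      ((upLoopA cls fA a).2 = false → (propB fB a cnf).1 = resCnf (upLoopA cls fA a).1 cls) := by
  intro fB
  induction fB with
  | zero => intro fA a cnf _ _ hB; omega
  | succ fB ih =>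
    intro fA a cnf hr hA hB
    cases fA with
    | zero => omega
    | succ fA =>
      obtain ⟨b1, b2, b3⟩ := round_bisim cls cnf a false hr
      rcases hRB : roundB a false [] cnf with ⟨r1, a1, cf1, ch1⟩
      rw [hRB] at b1 b2 b3
      rw [← b1] at b2 b3
      have hext : ExtD a a1 := by
        have := roundB_ext cnf a false []
        rw [hRB] at this
        exact this
      cases cf1 with
      | true =>
        simp [propB, upLoopA, hRB, ← b1]
      | false =>
        cases ch1 with
        | false =>
          obtain ⟨haa, hout⟩ := b3 rfl rfl
          simp only [propB, upLoopA, hRB, ← b1, Bool.false_or, Bool.not_false, if_true,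
            Bool.false_eq_true, if_false]
          simp only at haa hout
          rw [haa]
          exact ⟨trivial, trivial, fun _ => hout⟩
        | true =>
          have hr' : RRel a1 cls r1 := b2 rfl
          have hch : (roundB a false [] cnf).2.2.2 = true := by rw [hRB]
          rcases roundB_fresh cnf a false [] hch with h' | ⟨v, hv, h1, h2⟩
          · exact absurd h' (by simp)
          · rw [hRB] at h2
            have hlt : mFin cnf a1 < mFin cnf a := mFin_strict hext hv h1 h2
            have hle : mFin r1 a1 ≤ mFin cnf a1 := by
              apply mFin_mono_cnf
              intro l ⟨cl', hcl', hl⟩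
              have := roundB_vars cnf a false [] cl'
              rw [hRB] at this
              rcases this hcl' l hl with h'' | h''
              · simp at h''
              · exact h''
            have hres := ih fA a1 r1 hr' (by omega) (by omega)
            simp only [propB, upLoopA, hRB, ← b1, Bool.false_or, Bool.not_true,
              Bool.false_eq_true, if_false]
            simpa using hres

theorem rrel_of_res {a a' : PySem.Dict Int Bool} (he : ExtD a a') (cls : List (List Int)) :
    RRel a' cls (resCnf a cls) := by
  induction cls with
  | nil => simpa [resCnf] using RRel.nil a'
  | cons cl rest ih =>
    by_cases hs : satB a cl
    · rw [resCnf_cons_sat a cl rest hs]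
      exact RRel.drop _ cl rest _ (satB_mono he hs) ih
    · have hs' : satB a cl = false := by simpa using hs
      rw [resCnf_cons_unsat a cl rest hs']
      exact RRel.keep _ a cl rest _ he hs' ih

theorem resCnf_sum_le (a : PySem.Dict Int Bool) (cls : List (List Int)) :
    ((resCnf a cls).map List.length).sum ≤ (cls.map List.length).sum := by
  induction cls with
  | nil => simp [resCnf]
  | cons cl rest ih =>
    by_cases hs : satB a cl
    · rw [resCnf_cons_sat a cl rest hs]
      simp only [List.map_cons, List.sum_cons]
      omega
    · have hs' : satB a cl = false := by simpa using hs
      rw [resCnf_cons_unsat a cl rest hs']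
      simp only [List.map_cons, List.sum_cons]
      have hlen : (resL a cl).length ≤ cl.length := List.length_filter_le _ _
      omega

theorem resCnf_empty (cls : List (List Int)) : resCnf PySem.Dict.empty cls = cls := by
  have h1 : ∀ cl : List Int, satB (PySem.Dict.empty (κ := Int) (ν := Bool)) cl = false := by
    intro cl
    unfold satB
    simp [PySem.Dict.get?_empty]
  have h2 : ∀ cl : List Int, resL (PySem.Dict.empty (κ := Int) (ν := Bool)) cl = cl := by
    intro cl
    unfold resL
    simp [PySem.Dict.contains_empty]
  unfold resCnf
  simp only [h1, Bool.not_false, List.filter_true]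
  rw [List.map_congr_left (fun cl _ => h2 cl)]
  simp

theorem countsB_eq (cnf : List (List Int)) :
    countsB cnf = PySem.Dict.counter (cnf.flatten.map (fun l => |l|)) := by
  unfold countsB
  rw [← PySem.Dict.foldl_insert_getD_add_one_eq_counter, List.foldl_map, List.foldl_flatten]

theorem scoresA_eq (clauses : List (List Int)) (a : PySem.Dict Int Bool) :
    scoresA clauses a = PySem.Dict.counter ((resCnf a clauses).flatten.map (fun l => |l|)) := by
  unfold scoresA
  rw [PySem.Dict.counter_eq_foldl, List.foldl_map, List.foldl_flatten]
  unfold resCnf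
  rw [List.foldl_map, ← PySem.List.foldl_if_eq_foldl_filter]
  apply PySem.List.foldl_congr_mem
  intro acc cl _
  rw [clSatA_eq_satB]
  by_cases hs : satB a cl
  · simp [hs]
  · have hs' : satB a cl = false := by simpa using hs
    simp only [hs', Bool.false_eq_true, if_false, Bool.not_false, if_true]
    unfold resL
    rw [← PySem.List.foldl_if_eq_foldl_filter]
    apply PySem.List.foldl_congr_mem
    intro acc' l _
    by_cases hc : a.contains |l| <;> simp [hc]

-- a key of the counts dict is an unassigned variable
theorem counts_key_unassigned {a : PySem.Dict Int Bool} {cls : List (List Int)} {var : Int}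
    (h : var ∈ (PySem.Dict.counter ((resCnf a cls).flatten.map (fun l => |l|))).keys) :
    a.contains var = false := by
  rw [PySem.Dict.keys_counter, PySem.Set.mem_ofList, List.mem_map] at h
  obtain ⟨l, hl, rfl⟩ := h
  rw [List.mem_flatten] at hl
  obtain ⟨cl', hcl', hlc⟩ := hl
  unfold resCnf at hcl'
  rw [List.mem_map] at hcl'
  obtain ⟨cl, _, rfl⟩ := hcl'
  have := List.of_mem_filter hlc
  simpa using this

-- the outer loops agree when B carries the exact residual
theorem main_bisim (clauses : List (List Int)) :
    ∀ (fuel : Nat) (step : Int) (assign : PySem.Dict Int Bool) (traj : List (Int × Int)),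
      mainA clauses fuel step assign traj = mainB fuel step assign (resCnf assign clauses) traj := by
  intro fuel
  induction fuel with
  | zero => intro step assign traj; rfl
  | succ k ih =>
    intro step assign traj
    have hsc : scoresA clauses assign = countsB (resCnf assign clauses) := by
      rw [scoresA_eq, countsB_eq]
    simp only [mainA, mainB, hsc]
    cases hm : PySem.List.max? (countsB (resCnf assign clauses)).keys
        (fun kk => (countsB (resCnf assign clauses)).getD kk 0) with
    | none => rfl
    | some var =>
      simp only []
      have hvar : assign.contains var = false := by
        apply counts_key_unassigned (a := assign) (cls := clauses)
        rw [← countsB_eq]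
        exact PySem.List.max?_mem hm
      have hfuel : ∀ b : Bool,
          mFin (resCnf assign clauses) (assign.insert var b) < (clauses.map List.length).sum + 1 ∧
          mFin (resCnf assign clauses) (assign.insert var b) < ((resCnf assign clauses).map List.length).sum + 1 := by
        intro b
        have h1 := mFin_le_sum (resCnf assign clauses) (assign.insert var b)
        have h2 := resCnf_sum_le assign clauses
        omega
      have hbis : ∀ b : Bool,
          (propB (((resCnf assign clauses).map List.length).sum + 1) (assign.insert var b) (resCnf assign clauses)).2.1
            = (upA clauses (assign.insert var b)).1 ∧
          (propB (((resCnf assign clauses).map List.length).sum + 1) (assign.insert var b) (resCnf assign clauses)).2.2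
            = (upA clauses (assign.insert var b)).2 ∧
          ((upA clauses (assign.insert var b)).2 = false →
            (propB (((resCnf assign clauses).map List.length).sum + 1) (assign.insert var b) (resCnf assign clauses)).1
              = resCnf (upA clauses (assign.insert var b)).1 clauses) := by
        intro b
        have hR : RRel (assign.insert var b) clauses (resCnf assign clauses) :=
          rrel_of_res (extD_insert assign b hvar) clauses
        exact prop_bisim clauses _ _ _ _ hR (hfuel b).1 (hfuel b).2
      obtain ⟨t1, t2, t3⟩ := hbis true
      obtain ⟨f1, f2, f3⟩ := hbis false
      rw [t1, t2, f1, f2]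
      by_cases hboth : (upA clauses (assign.insert var true)).2 = true ∧
          (upA clauses (assign.insert var false)).2 = true
      · simp [hboth.1, hboth.2]
      · by_cases hct : (upA clauses (assign.insert var true)).2 = true
        · have hcf : (upA clauses (assign.insert var false)).2 = false := by
            rcases Bool.eq_false_or_eq_true (upA clauses (assign.insert var false)).2 with h | h
            · exact absurd ⟨hct, h⟩ hboth
            · exact h
          simp only [hct, hcf, Bool.and_false, Bool.false_eq_true, if_false, if_true]
          rw [f3 hcf, ih]
        · have hct' : (upA clauses (assign.insert var true)).2 = false := by
            rcases Bool.eq_false_or_eq_true (upA clauses (assign.insert var true)).2 with h | h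
            · exact absurd h hct
            · exact h
          by_cases hcf : (upA clauses (assign.insert var false)).2 = true
          · simp only [hct', hcf, Bool.false_and, Bool.false_eq_true, if_false, if_true]
            rw [t3 hct', ih]
          · have hcf' : (upA clauses (assign.insert var false)).2 = false := by
              rcases Bool.eq_false_or_eq_true (upA clauses (assign.insert var false)).2 with h | h
              · exact absurd h hcf
              · exact h
            simp only [hct', hcf', Bool.false_and, Bool.false_eq_true, if_false]
            by_cases hsz : (upA clauses (assign.insert var false)).1.size ≤ (upA clauses (assign.insert var true)).1.size
            · simp only [hsz, if_true]
              rw [t3 hct', ih]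
            · simp only [hsz, if_false]
              rw [f3 hcf', ih]

-- ===== VERDICT (by name: the statement is the Claim_ definition above) =====
theorem strategy_greedy_spec : Claim_equal_strategy_greedy := by
  intro clauses n max_steps rng _
  show strategy_greedy clauses n max_steps rng = strategy_greedy_alt clauses n max_steps rng
  unfold strategy_greedy strategy_greedy_alt
  have h := main_bisim clauses max_steps.toNat 0 PySem.Dict.empty []
  rw [resCnf_empty clauses] at h
  rw [h]
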